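-- pv_equiv track=rewrite | github.com/AndresAp01/Taller_de_Programacion | Tareas/Tareas Intro/tarea_6_Luis_Acunna_intro.py | Operar_For_i
-- ===== SOURCE A (Python) =====
-- def Operar_For_i(lista):
--     if type(lista)!=list or len(lista)==0:
--         return"Error"
--     resultado=[0]*len(lista)
--     i=0
--     for item in lista:
--         indice_0=i%len(lista)
--         indice_2=(i+2)%len(lista)
--         indice_4=(i+4)%len(lista)
--
--         resultado[i]=lista[indice_0]+lista[indice_2]-lista[indice_4]
--         i+=1
--     return resultado
-- ===== SOURCE B (Python) =====
-- def Operar_For_i(lista):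
--     if type(lista) != list or len(lista) == 0:
--         return "Error"
--     n = len(lista)
--     j, k = 2 % n, 4 % n
--     b = lista[j:] + lista[:j]
--     c = lista[k:] + lista[:k]
--     return [x + y - z for x, y, z in zip(lista, b, c)]
-- ===== Notes on version B (the rewrite author's own statement) =====
-- stated objective: simpler
-- what changed: B replaces A's preallocated result array and per-index modular arithmetic (i%n, (i+2)%n, (i+4)%n inside the loop) by two precomputed rotated copies of the list (slice-and-concatenate) combined with the original in a single zip comprehension.
-- outside the precondition, e.g. on Operar_For_i([]): A returns 'Error', B returns 'Error'
import Mathlib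
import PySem

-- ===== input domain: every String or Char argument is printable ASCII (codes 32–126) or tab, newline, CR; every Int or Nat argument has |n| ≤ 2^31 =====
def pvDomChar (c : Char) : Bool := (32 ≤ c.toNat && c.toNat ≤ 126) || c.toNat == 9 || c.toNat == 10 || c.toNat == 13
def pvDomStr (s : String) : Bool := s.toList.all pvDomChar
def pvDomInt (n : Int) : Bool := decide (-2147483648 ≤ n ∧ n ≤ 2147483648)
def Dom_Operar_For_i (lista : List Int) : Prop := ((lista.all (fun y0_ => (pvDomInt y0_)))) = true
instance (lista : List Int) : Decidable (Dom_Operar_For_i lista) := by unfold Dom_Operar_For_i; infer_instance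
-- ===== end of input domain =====

-- B replaces A's per-index modular arithmetic by two precomputed rotated copies of the
-- input combined in one zip pass (objective: simpler).

-- ===== PORT A =====
-- On the empty list the Python returns the string "Error" (not a list of ints);
-- Pre_ excludes it, so the [] branch here is never claimed about.
def Operar_For_i (lista : List Int) : List Int :=
  if lista.length = 0 then []
  else
    let n : Int := (lista.length : Int)
    (lista.foldl (fun (st : List Int × Int) _item =>
        let resultado := st.1
        let i := st.2
        let indice0 := PySem.Int.mod i n
        let indice2 := PySem.Int.mod (i + 2) n
        let indice4 := PySem.Int.mod (i + 4) n
        (PySem.List.pySetD resultado i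
          (PySem.List.pyGetD lista indice0 0 + PySem.List.pyGetD lista indice2 0
            - PySem.List.pyGetD lista indice4 0), i + 1))
      (List.replicate lista.length 0, 0)).1

-- ===== PORT B =====
def Operar_For_i_alt (lista : List Int) : List Int :=
  if lista.length = 0 then []
  else
    let n : Int := (lista.length : Int)
    let j := PySem.Int.mod 2 n
    let k := PySem.Int.mod 4 n
    let b := PySem.List.slice lista (some j) none ++ PySem.List.slice lista none (some j)
    let c := PySem.List.slice lista (some k) none ++ PySem.List.slice lista none (some k)
    (lista.zip (b.zip c)).map (fun p => p.1 + p.2.1 - p.2.2)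

-- ===== PRECONDITION & SPEC =====
-- Pre_ excludes the empty list, on which the Python A returns the string "Error"
-- instead of a list of ints.
def Pre_Operar_For_i (lista : List Int) : Prop := lista ≠ []
instance (lista : List Int) : Decidable (Pre_Operar_For_i lista) := by
  unfold Pre_Operar_For_i; infer_instance
def pvWitness_Operar_For_i : List Int := [3, -1, 4, 1, 5]
def Spec_Operar_For_i (lista : List Int) (out : List Int) : Prop := out = Operar_For_i_alt lista
instance (lista : List Int) (out : List Int) : Decidable (Spec_Operar_For_i lista out) := by
  unfold Spec_Operar_For_i; infer_instance

-- ===== CLAIM (what is proved, stated in full; the proofs are below) =====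
def Claim_equal_Operar_For_i : Prop := ∀ (lista : List Int), Dom_Operar_For_i lista →
  Pre_Operar_For_i lista → Spec_Operar_For_i lista (Operar_For_i lista)

-- ===== LEMMAS AND PROOFS =====

-- the value A writes at position m
def pvF (lista : List Int) (m : Nat) : Int :=
  lista.getD (m % lista.length) 0 + lista.getD ((m + 2) % lista.length) 0
    - lista.getD ((m + 4) % lista.length) 0

-- characterization of A's fold: it performs n positional writes
theorem pvFoldA_char (lista : List Int) (items : List Int) :
    ∀ (res : List Int) (i : Nat),
    ((items.foldl (fun (st : List Int × Int) _item =>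
        let resultado := st.1
        let i := st.2
        let indice0 := PySem.Int.mod i ((lista.length : Int))
        let indice2 := PySem.Int.mod (i + 2) ((lista.length : Int))
        let indice4 := PySem.Int.mod (i + 4) ((lista.length : Int))
        (PySem.List.pySetD resultado i
          (PySem.List.pyGetD lista indice0 0 + PySem.List.pyGetD lista indice2 0
            - PySem.List.pyGetD lista indice4 0), i + 1))
      (res, (i : Int))).1)
      = (List.range items.length).foldl (fun r t => r.set (i + t) (pvF lista (i + t))) res := by
  induction items with
  | nil => intro res i; simp
  | cons x xs ih =>
    intro res i
    rw [List.foldl_cons]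
    have h2 : ((i : Int) + 2) = ((i + 2 : Nat) : Int) := by push_cast; ring
    have h4 : ((i : Int) + 4) = ((i + 4 : Nat) : Int) := by push_cast; ring
    have h1 : ((i : Int) + 1) = ((i + 1 : Nat) : Int) := by push_cast; ring
    have hstep : (let resultado := ((res, (i : Int)) : List Int × Int).1
        let ii := ((res, (i : Int)) : List Int × Int).2
        let indice0 := PySem.Int.mod ii ((lista.length : Int))
        let indice2 := PySem.Int.mod (ii + 2) ((lista.length : Int))
        let indice4 := PySem.Int.mod (ii + 4) ((lista.length : Int))
        (PySem.List.pySetD resultado ii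
          (PySem.List.pyGetD lista indice0 0 + PySem.List.pyGetD lista indice2 0
            - PySem.List.pyGetD lista indice4 0), ii + 1))
        = ((res.set i (pvF lista i), ((i + 1 : Nat) : Int)) : List Int × Int) := by
      simp only [h1, h2, h4, PySem.Int.mod_natCast, PySem.List.pyGetD_natCast,
        PySem.List.pySetD_natCast, pvF]
    rw [hstep]
    rw [ih]
    rw [List.length_cons, List.range_succ_eq_map, List.foldl_cons]
    simp only [Nat.add_zero, List.foldl_map]
    congr 1
    funext r t
    have ht : i + (t + 1) = i + 1 + t := by omega
    simp only [Nat.succ_eq_add_one, ht]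

theorem pvSets_getElem? (lista : List Int) :
    ∀ (m : Nat) (res : List Int) (i : Nat) (k : Nat),
    ((List.range m).foldl (fun r t => r.set (i + t) (pvF lista (i + t))) res)[k]?
      = if i ≤ k ∧ k < i + m ∧ k < res.length then some (pvF lista k) else res[k]? := by
  intro m
  induction m with
  | zero =>
    intro res i k
    rw [if_neg (by omega)]
    simp
  | succ m ih =>
    intro res i k
    rw [List.range_succ, List.foldl_append, List.foldl_cons, List.foldl_nil]
    have hlen : ((List.range m).foldl (fun r t => r.set (i + t) (pvF lista (i + t))) res).length
        = res.length := by
      clear ih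
      induction m generalizing res with
      | zero => simp
      | succ m ihm => rw [List.range_succ, List.foldl_append]; simp [ihm]
    by_cases hkm : k = i + m
    · subst hkm
      by_cases hres : i + m < res.length
      · rw [List.getElem?_set_self (by rw [hlen]; omega)]
        rw [if_pos ⟨by omega, by omega, hres⟩]
      · rw [List.getElem?_eq_none (by rw [List.length_set, hlen]; omega)]
        rw [if_neg (by omega), eq_comm]
        exact List.getElem?_eq_none (by omega)
    · rw [List.getElem?_set_ne (by omega), ih]
      by_cases hik : i ≤ k ∧ k < i + m ∧ k < res.length
      · rw [if_pos hik, if_pos ⟨hik.1, by omega, hik.2.2⟩]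
      · rw [if_neg hik, if_neg (by omega)]

-- element of a rotation built as drop ++ take
theorem pvRot_getElem (lista : List Int) (j : Nat) (hj : j ≤ lista.length)
    (k : Nat) (hk : k < lista.length) (h' : k < (lista.drop j ++ lista.take j).length) :
    (lista.drop j ++ lista.take j)[k]'h'
      = lista[(k + j) % lista.length]'(Nat.mod_lt _ (by omega)) := by
  have e : lista.drop j ++ lista.take j = lista.rotate j :=
    (List.rotate_eq_drop_append_take hj).symm
  rw [List.getElem_of_eq e, List.getElem_rotate]

-- pvF at an in-range position, in getElem form
theorem pvF_eq (lista : List Int) (k : Nat) (hk : k < lista.length) :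
    pvF lista k = lista[k]'hk
      + lista[(k + 2) % lista.length]'(Nat.mod_lt _ (by omega))
      - lista[(k + 4) % lista.length]'(Nat.mod_lt _ (by omega)) := by
  unfold pvF
  rw [Nat.mod_eq_of_lt hk]
  rw [List.getD_eq_getElem _ _ hk, List.getD_eq_getElem _ _ (Nat.mod_lt _ (by omega)),
      List.getD_eq_getElem _ _ (Nat.mod_lt _ (by omega))]

theorem Operar_For_i_eq (lista : List Int) (h : lista ≠ []) :
    Operar_For_i lista = Operar_For_i_alt lista := by
  have hn : 0 < lista.length := List.length_pos_iff.mpr h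
  have hne : ¬ lista.length = 0 := by omega
  unfold Operar_For_i Operar_For_i_alt
  rw [if_neg hne, if_neg hne]
  simp only []
  have m2 : PySem.Int.mod 2 ((lista.length : Int)) = ((2 % lista.length : Nat) : Int) := by
    rw [show (2 : Int) = ((2 : Nat) : Int) from by norm_num, PySem.Int.mod_natCast]
  have m4 : PySem.Int.mod 4 ((lista.length : Int)) = ((4 % lista.length : Nat) : Int) := by
    rw [show (4 : Int) = ((4 : Nat) : Int) from by norm_num, PySem.Int.mod_natCast]
  rw [m2, m4, PySem.List.slice_from_natCast, PySem.List.slice_to_natCast,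
    PySem.List.slice_from_natCast, PySem.List.slice_to_natCast]
  have hchar := pvFoldA_char lista lista (List.replicate lista.length 0) 0
  rw [Nat.cast_zero] at hchar
  rw [hchar]
  simp only [Nat.zero_add]
  have h2 : 2 % lista.length < lista.length := Nat.mod_lt _ hn
  have h4 : 4 % lista.length < lista.length := Nat.mod_lt _ hn
  have hblen : (lista.drop (2 % lista.length) ++ lista.take (2 % lista.length)).length
      = lista.length := by simp; omega
  have hclen : (lista.drop (4 % lista.length) ++ lista.take (4 % lista.length)).length
      = lista.length := by simp; omega
  apply List.ext_getElem?
  intro k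
  have hA := pvSets_getElem? lista lista.length (List.replicate lista.length 0) 0 k
  simp only [Nat.zero_add, List.length_replicate] at hA
  rw [hA]
  by_cases hk : k < lista.length
  · rw [if_pos ⟨Nat.zero_le _, hk, hk⟩]
    rw [List.getElem?_eq_getElem (by simp; omega)]
    simp only [List.getElem_map, List.getElem_zip]
    rw [pvRot_getElem lista (2 % lista.length) (by omega) k hk,
        pvRot_getElem lista (4 % lista.length) (by omega) k hk]
    have e2 : (k + 2 % lista.length) % lista.length = (k + 2) % lista.length := by
      conv_lhs => rw [Nat.add_mod]
      conv_rhs => rw [Nat.add_mod]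
      rw [Nat.mod_mod_of_dvd _ (dvd_refl lista.length)]
    have e4 : (k + 4 % lista.length) % lista.length = (k + 4) % lista.length := by
      conv_lhs => rw [Nat.add_mod]
      conv_rhs => rw [Nat.add_mod]
      rw [Nat.mod_mod_of_dvd _ (dvd_refl lista.length)]
    simp only [e2, e4]
    rw [pvF_eq lista k hk]
  · rw [if_neg (by omega)]
    rw [List.getElem?_eq_none (by simp; omega), List.getElem?_eq_none (by simp; omega)]

-- ===== VERDICT (by name: the statement is the Claim_ definition above) =====
theorem Operar_For_i_spec : Claim_equal_Operar_For_i := by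
  intro lista _ hpre
  unfold Spec_Operar_For_i
  exact Operar_For_i_eq lista hpre
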